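-- pv_equiv track=rewrite | github.com/bjzgcai/eval | audit/src/oss_audit/core/tool_knowledge_base.py | _are_related_languages
-- ===== SOURCE A (Python) =====
-- def _are_related_languages(lang1: str, lang2: str) -> bool:
--     """判断编程语言是否相关"""
--     related_groups = [
--         {'javascript', 'typescript'},
--         {'python', 'python3'},
--         {'c', 'cpp', 'c++'},
--         {'java', 'kotlin', 'scala'}
--     ]
--
--     for group in related_groups:
--         if lang1 in group and lang2 in group:
--             return True
--     return False
-- ===== SOURCE B (Python) =====
-- _GROUP_ID = {}
-- for _gid, _group in enumerate([
--     ('javascript', 'typescript'),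
--     ('python', 'python3'),
--     ('c', 'cpp', 'c++'),
--     ('java', 'kotlin', 'scala'),
-- ]):
--     for _lang in _group:
--         _GROUP_ID[_lang] = _gid
--
--
-- def _are_related_languages(lang1: str, lang2: str) -> bool:
--     """判断编程语言是否相关"""
--     gid = _GROUP_ID.get(lang1)
--     return gid is not None and gid == _GROUP_ID.get(lang2)
-- ===== Notes on version B (the rewrite author's own statement) =====
-- stated objective: idiomatic
-- what changed: Replaces the loop over group sets (two membership tests per group) with a precomputed language-to-group-id dict and two direct lookups, guarding the unknown-language case so two missing languages are not related.
import Mathlib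
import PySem

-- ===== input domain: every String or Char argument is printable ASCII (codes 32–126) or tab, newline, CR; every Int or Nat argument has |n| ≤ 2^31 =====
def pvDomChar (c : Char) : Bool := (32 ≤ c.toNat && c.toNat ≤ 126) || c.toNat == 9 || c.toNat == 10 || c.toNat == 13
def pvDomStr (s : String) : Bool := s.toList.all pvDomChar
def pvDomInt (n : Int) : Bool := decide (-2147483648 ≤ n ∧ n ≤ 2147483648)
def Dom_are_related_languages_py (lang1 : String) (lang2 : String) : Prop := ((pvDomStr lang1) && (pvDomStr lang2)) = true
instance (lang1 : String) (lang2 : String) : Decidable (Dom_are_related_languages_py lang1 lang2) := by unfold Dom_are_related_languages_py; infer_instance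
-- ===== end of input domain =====

-- B replaces A's scan over the group sets with a precomputed language→group-id dict and two lookups (idiomatic; same exact behaviour).

-- ===== PORT A =====
-- A: literal list of set literals, scanned with early return (List.any = the 'for … return True' loop).
def are_related_languages_py (lang1 : String) (lang2 : String) : Bool :=
  let related_groups : List (PySem.Set String) :=
    [ PySem.Set.ofList ["javascript", "typescript"],
      PySem.Set.ofList ["python", "python3"],
      PySem.Set.ofList ["c", "cpp", "c++"],
      PySem.Set.ofList ["java", "kotlin", "scala"] ]
  related_groups.any (fun group => PySem.Set.contains group lang1 && PySem.Set.contains group lang2)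

-- ===== PORT B =====
-- B's module-level dict _GROUP_ID (built once, in insertion order).
def pvGroupId : PySem.Dict String Int :=
  PySem.Dict.ofList
    [ ("javascript", 0), ("typescript", 0),
      ("python", 1), ("python3", 1),
      ("c", 2), ("cpp", 2), ("c++", 2),
      ("java", 3), ("kotlin", 3), ("scala", 3) ]

-- gid = _GROUP_ID.get(lang1); return gid is not None and gid == _GROUP_ID.get(lang2)
def are_related_languages_py_alt (lang1 : String) (lang2 : String) : Bool :=
  match pvGroupId.get? lang1 with
  | none => false
  | some gid => pvGroupId.get? lang2 == some gid

-- ===== PRECONDITION & SPEC =====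
def Spec_are_related_languages_py (lang1 : String) (lang2 : String) (out : Bool) : Prop := out = are_related_languages_py_alt lang1 lang2
instance (lang1 : String) (lang2 : String) (out : Bool) : Decidable (Spec_are_related_languages_py lang1 lang2 out) := by unfold Spec_are_related_languages_py; infer_instance

-- ===== CLAIM (what is proved, stated in full; the proofs are below) =====
def Claim_equal_are_related_languages_py : Prop := ∀ (lang1 : String) (lang2 : String), Dom_are_related_languages_py lang1 lang2 → Spec_are_related_languages_py lang1 lang2 (are_related_languages_py lang1 lang2)

-- ===== LEMMAS AND PROOFS =====

-- proof-only helper: the group id of a language as an if-chain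
def pvGid (s : String) : Option Int :=
  if s = "javascript" then some 0 else if s = "typescript" then some 0 else
  if s = "python" then some 1 else if s = "python3" then some 1 else
  if s = "c" then some 2 else if s = "cpp" then some 2 else if s = "c++" then some 2 else
  if s = "java" then some 3 else if s = "kotlin" then some 3 else if s = "scala" then some 3 else
  none

theorem pvGroupId_get?_eq (s : String) : pvGroupId.get? s = pvGid s := by
  rcases eq_or_ne s "javascript" with h|h1; · subst h; rfl
  rcases eq_or_ne s "typescript" with h|h2; · subst h; rfl
  rcases eq_or_ne s "python" with h|h3; · subst h; rfl
  rcases eq_or_ne s "python3" with h|h4; · subst h; rfl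
  rcases eq_or_ne s "c" with h|h5; · subst h; rfl
  rcases eq_or_ne s "cpp" with h|h6; · subst h; rfl
  rcases eq_or_ne s "c++" with h|h7; · subst h; rfl
  rcases eq_or_ne s "java" with h|h8; · subst h; rfl
  rcases eq_or_ne s "kotlin" with h|h9; · subst h; rfl
  rcases eq_or_ne s "scala" with h|h10; · subst h; rfl
  simp [pvGroupId, pvGid, PySem.Dict.ofList, PySem.Dict.update, List.foldl,
    PySem.Dict.get?_insert, PySem.Dict.get?_empty, h1, h2, h3, h4, h5, h6, h7, h8, h9, h10]

theorem pvGid_range (l : String) (a : Int) (h : pvGid l = some a) :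
    a = 0 ∨ a = 1 ∨ a = 2 ∨ a = 3 := by
  unfold pvGid at h
  split_ifs at h <;> simp_all

theorem pvContains0 (l : String) :
    PySem.Set.contains (PySem.Set.ofList ["javascript", "typescript"]) l
      = decide (pvGid l = some 0) := by
  rcases eq_or_ne l "javascript" with h|h1; · subst h; rfl
  rcases eq_or_ne l "typescript" with h|h2; · subst h; rfl
  simp only [pvGid, PySem.Set.ofList, PySem.Set.add, PySem.Set.contains, List.foldl]
  simp [h1, h2]
  split_ifs <;> simp

theorem pvContains1 (l : String) :
    PySem.Set.contains (PySem.Set.ofList ["python", "python3"]) l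
      = decide (pvGid l = some 1) := by
  rcases eq_or_ne l "python" with h|h1; · subst h; rfl
  rcases eq_or_ne l "python3" with h|h2; · subst h; rfl
  simp only [pvGid, PySem.Set.ofList, PySem.Set.add, PySem.Set.contains, List.foldl]
  simp [h1, h2]
  split_ifs <;> simp

theorem pvContains2 (l : String) :
    PySem.Set.contains (PySem.Set.ofList ["c", "cpp", "c++"]) l
      = decide (pvGid l = some 2) := by
  rcases eq_or_ne l "c" with h|h1; · subst h; rfl
  rcases eq_or_ne l "cpp" with h|h2; · subst h; rfl
  rcases eq_or_ne l "c++" with h|h3; · subst h; rfl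
  simp only [pvGid, PySem.Set.ofList, PySem.Set.add, PySem.Set.contains, List.foldl]
  simp [h1, h2, h3]
  split_ifs <;> simp

theorem pvContains3 (l : String) :
    PySem.Set.contains (PySem.Set.ofList ["java", "kotlin", "scala"]) l
      = decide (pvGid l = some 3) := by
  rcases eq_or_ne l "java" with h|h1; · subst h; rfl
  rcases eq_or_ne l "kotlin" with h|h2; · subst h; rfl
  rcases eq_or_ne l "scala" with h|h3; · subst h; rfl
  simp only [pvGid, PySem.Set.ofList, PySem.Set.add, PySem.Set.contains, List.foldl]
  simp [h1, h2, h3]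
  split_ifs <;> simp

-- ===== VERDICT (by name: the statement is the Claim_ definition above) =====
theorem are_related_languages_py_spec : Claim_equal_are_related_languages_py := by
  intro l1 l2 _
  unfold Spec_are_related_languages_py are_related_languages_py are_related_languages_py_alt
  rw [pvGroupId_get?_eq, pvGroupId_get?_eq]
  simp only [List.any_cons, List.any_nil, pvContains0, pvContains1, pvContains2, pvContains3,
    Bool.or_false]
  cases hx : pvGid l1 with
  | none => simp
  | some a =>
    cases hy : pvGid l2 with
    | none => simp
    | some b =>
      rcases pvGid_range l1 a hx with ha|ha|ha|ha <;>
        rcases pvGid_range l2 b hy with hb|hb|hb|hb <;>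
          subst ha <;> subst hb <;> simp
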